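-- pv_equiv track=rewrite | github.com/lsiepman/SudokuSolver | Code/main.py | FindSquare
-- ===== SOURCE A (Python) =====
-- def FindSquare(cell):
--     sq1 = ["A0", "B0", "C0", "A1", "B1", "C1", "A2", "B2", "C2"]
--     sq2 = ["D0", "E0", "F0", "D1", "E1", "F1", "D2", "E2", "F2"]
--     sq3 = ["G0", "H0", "I0", "G1", "H1", "I1", "G2", "H2", "I2"]
--     sq4 = ["A3", "B3", "C3", "A4", "B4", "C4", "A5", "B5", "C5"]
--     sq5 = ["D3", "E3", "F3", "D4", "E4", "F4", "D5", "E5", "F5"]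
--     sq6 = ["G3", "H3", "I3", "G4", "H4", "I4", "G5", "H5", "I5"]
--     sq7 = ["A6", "B6", "C6", "A7", "B7", "C7", "A8", "B8", "C8"]
--     sq8 = ["D6", "E6", "F6", "D7", "E7", "F7", "D8", "E8", "F8"]
--     sq9 = ["G6", "H6", "I6", "G7", "H7", "I7", "G8", "H8", "I8"]
--
--     for square in [sq1, sq2, sq3, sq4, sq5, sq6, sq7, sq8, sq9]:
--         if cell in square:
--             square.remove(cell)
--             return square
-- ===== SOURCE B (Python) =====
-- def FindSquare(cell):
--     # parse the cell instead of scanning nine hardcoded lists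
--     if not isinstance(cell, str) or len(cell) != 2:
--         return None
--     c = ord(cell[0]) - ord('A')
--     r = ord(cell[1]) - ord('0')
--     if not (0 <= c <= 8 and 0 <= r <= 8):
--         return None
--     col0 = c // 3 * 3
--     row0 = r // 3 * 3
--     return [s for dr in range(3) for dc in range(3)
--             if (s := chr(ord('A') + col0 + dc) + str(row0 + dr)) != cell]
-- ===== Notes on version B (the rewrite author's own statement) =====
-- stated objective: simpler
-- what changed: Replaces the nine hardcoded 9-cell lists and the membership scan with arithmetic: parse the cell's column and row, compute the 3x3 block origin with //3*3, generate the block's nine cells and filter out the given cell.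
-- outside the precondition, e.g. on FindSquare('Z9'): A returns None, B returns None; on FindSquare('a0'): A returns None, B returns None; on FindSquare(''): A returns None, B returns None
import Mathlib
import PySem

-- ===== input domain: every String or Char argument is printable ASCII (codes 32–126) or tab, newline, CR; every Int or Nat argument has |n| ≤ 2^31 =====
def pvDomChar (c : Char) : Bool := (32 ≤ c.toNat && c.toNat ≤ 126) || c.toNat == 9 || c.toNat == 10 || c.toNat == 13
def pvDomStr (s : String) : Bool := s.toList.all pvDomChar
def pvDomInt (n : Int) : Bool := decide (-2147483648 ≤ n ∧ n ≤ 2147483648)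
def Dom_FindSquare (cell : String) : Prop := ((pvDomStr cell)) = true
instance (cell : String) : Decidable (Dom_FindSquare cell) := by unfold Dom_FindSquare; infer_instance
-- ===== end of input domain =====

-- B replaces A's nine hardcoded block lists with arithmetic on the parsed cell (simpler);
-- equivalence of the RETURN value is proved on the 81 valid cells (elsewhere A returns None, not a list).

-- ===== PORT A =====
-- loop 'for square in [sq1..sq9]: if cell in square: square.remove(cell); return square'
def findSquareLoop (cell : String) : List (List String) → List String
  | [] => []   -- Python falls off the loop and returns None here; excluded by Pre_FindSquare
  | sq :: rest =>
    if cell ∈ sq then (PySem.List.remove? sq cell).getD sq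
    else findSquareLoop cell rest

def FindSquare (cell : String) : List String :=
  let sq1 := ["A0", "B0", "C0", "A1", "B1", "C1", "A2", "B2", "C2"]
  let sq2 := ["D0", "E0", "F0", "D1", "E1", "F1", "D2", "E2", "F2"]
  let sq3 := ["G0", "H0", "I0", "G1", "H1", "I1", "G2", "H2", "I2"]
  let sq4 := ["A3", "B3", "C3", "A4", "B4", "C4", "A5", "B5", "C5"]
  let sq5 := ["D3", "E3", "F3", "D4", "E4", "F4", "D5", "E5", "F5"]
  let sq6 := ["G3", "H3", "I3", "G4", "H4", "I4", "G5", "H5", "I5"]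
  let sq7 := ["A6", "B6", "C6", "A7", "B7", "C7", "A8", "B8", "C8"]
  let sq8 := ["D6", "E6", "F6", "D7", "E7", "F7", "D8", "E8", "F8"]
  let sq9 := ["G6", "H6", "I6", "G7", "H7", "I7", "G8", "H8", "I8"]
  findSquareLoop cell [sq1, sq2, sq3, sq4, sq5, sq6, sq7, sq8, sq9]

-- ===== PORT B =====
-- parse the cell, compute the block origin by arithmetic, generate the 9 cells, drop the given one
def FindSquare_alt (cell : String) : List String :=
  match cell.toList with
  | [a, b] =>
    let c : Int := (a.toNat : Int) - 65   -- ord(cell[0]) - ord('A')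
    let r : Int := (b.toNat : Int) - 48   -- ord(cell[1]) - ord('0')
    if 0 ≤ c ∧ c ≤ 8 ∧ 0 ≤ r ∧ r ≤ 8 then
      let col0 := PySem.Int.floordiv c 3 * 3
      let row0 := PySem.Int.floordiv r 3 * 3
      ((List.range 3).flatMap fun dr =>
        ((List.range 3).map fun dc =>
          String.ofList [Char.ofNat (65 + (col0 + dc).toNat)] ++ PySem.Int.toStr (row0 + dr))).filter
        (fun s => s ≠ cell)
    else []   -- Python B returns None here; excluded by Pre_FindSquare
  | _ => []   -- Python B returns None here; excluded by Pre_FindSquare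

-- ===== PRECONDITION & SPEC =====
-- Pre_ excludes exactly the inputs on which A returns None (no value of type list): everything
-- other than the 81 valid Sudoku cells "A0".."I8".
def pvAllCells : List String :=
  ["A0", "B0", "C0", "D0", "E0", "F0", "G0", "H0", "I0", "A1", "B1", "C1", "D1", "E1", "F1", "G1", "H1", "I1", "A2", "B2", "C2", "D2", "E2", "F2", "G2", "H2", "I2", "A3", "B3", "C3", "D3", "E3", "F3", "G3", "H3", "I3", "A4", "B4", "C4", "D4", "E4", "F4", "G4", "H4", "I4", "A5", "B5", "C5", "D5", "E5", "F5", "G5", "H5", "I5", "A6", "B6", "C6", "D6", "E6", "F6", "G6", "H6", "I6", "A7", "B7", "C7", "D7", "E7", "F7", "G7", "H7", "I7", "A8", "B8", "C8", "D8", "E8", "F8", "G8", "H8", "I8"]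

def Pre_FindSquare (cell : String) : Prop := cell ∈ pvAllCells
instance (cell : String) : Decidable (Pre_FindSquare cell) := by unfold Pre_FindSquare; infer_instance

def pvWitness_FindSquare : String := "E4"

def Spec_FindSquare (cell : String) (out : List String) : Prop := out = FindSquare_alt cell
instance (cell : String) (out : List String) : Decidable (Spec_FindSquare cell out) := by unfold Spec_FindSquare; infer_instance

-- ===== CLAIM (what is proved, stated in full; the proofs are below) =====
def Claim_equal_FindSquare : Prop := ∀ (cell : String), Dom_FindSquare cell → Pre_FindSquare cell → Spec_FindSquare cell (FindSquare cell)

-- ===== LEMMAS AND PROOFS =====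
theorem agree_on_all_cells : ∀ cell ∈ pvAllCells, FindSquare cell = FindSquare_alt cell := by
  decide

-- ===== VERDICT (by name: the statement is the Claim_ definition above) =====
theorem FindSquare_spec : Claim_equal_FindSquare := by
  intro cell _ hpre
  exact agree_on_all_cells cell hpre
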